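-- pv_equiv track=rewrite | github.com/bambielli/jspractice | codejam/2018/qualifier/trouble-sort/trouble-sort.py | eval_trouble_sort
-- ===== SOURCE A (Python) =====
-- def trouble_sort(sequence):
--   done = False
--   while not done:
--     done = True
--     for i in range(0, len(sequence) - 2):
--       if sequence[i] > sequence[i + 2]:
--         done = False
--         sequence[i], sequence[i + 2] = sequence[i + 2], sequence[i]
--
-- def eval_trouble_sort(sequence):
--   """
--   @param sequence: [1, 2, 3]
--   @preturn: String
--   """
--   trouble_sort(sequence) # mutates the original sequence
--   first_bad_index = "OK" # default is that array is OK
--   for index in range(0, len(sequence) - 1): # go to -1 so we don't index out of bounds with comparison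
--     if not sequence[index] <= sequence[index + 1]:
--       # the first time the order is not preserved, break
--       first_bad_index = str(index)
--       break
--
--   return first_bad_index
-- ===== SOURCE B (Python) =====
-- def eval_trouble_sort(sequence):
--     # Trouble sort converges to: even-index and odd-index subsequences each
--     # sorted, multisets per parity preserved.  So sort the two subsequences,
--     # interleave them, and report the first out-of-order adjacent pair.
--     # NOTE: unlike A, this does not mutate the caller's list (return value only).
--     evens = sorted(sequence[0::2])
--     odds = sorted(sequence[1::2])
--     merged = []
--     for x, y in zip(evens, odds):
--         merged.append(x)
--         merged.append(y)
--     if len(odds) < len(evens):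
--         merged.append(evens[-1])
--     for i, (x, y) in enumerate(zip(merged, merged[1:])):
--         if x > y:
--             return str(i)
--     return "OK"
-- ===== Notes on version B (the rewrite author's own statement) =====
-- stated objective: faster
-- what changed: Replaces the quadratic trouble-sort fixpoint loop (repeated swap passes until no swap) by sorting the even-index and odd-index subsequences once, interleaving them, and scanning for the first out-of-order adjacent pair; B does not mutate the input list (return value equivalence only).
import Mathlib
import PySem

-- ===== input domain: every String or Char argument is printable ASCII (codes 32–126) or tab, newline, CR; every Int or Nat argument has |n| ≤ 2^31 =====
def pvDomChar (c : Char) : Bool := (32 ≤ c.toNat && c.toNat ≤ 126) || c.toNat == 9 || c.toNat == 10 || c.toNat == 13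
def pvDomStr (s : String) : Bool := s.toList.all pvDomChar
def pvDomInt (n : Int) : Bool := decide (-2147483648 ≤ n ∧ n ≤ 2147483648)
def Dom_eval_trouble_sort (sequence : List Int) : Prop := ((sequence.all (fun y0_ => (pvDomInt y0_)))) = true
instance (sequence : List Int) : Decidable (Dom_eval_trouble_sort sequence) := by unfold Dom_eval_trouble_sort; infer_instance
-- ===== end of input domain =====

-- B replaces A's quadratic repeat-swap-passes loop by sorting the even- and odd-index
-- subsequences once and interleaving (O(n log n)); A mutates its argument in place, B does
-- not — the equivalence proved here is about the return value only.

-- ===== PORT A =====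

-- even-index / odd-index subsequences and the trouble-inversion measure: used only to
-- justify termination of A's while-loop (cited by pvLoopA's decreasing_by).
def pvEvens : List Int → List Int
  | [] => []
  | [a] => [a]
  | a :: _ :: t => a :: pvEvens t

def pvOdds (l : List Int) : List Int := pvEvens l.tail

def pvInv : List Int → Nat
  | [] => 0
  | a :: t => t.countP (fun x => x < a) + pvInv t

def pvMeasure (l : List Int) : Nat := pvInv (pvEvens l) + pvInv (pvOdds l)

-- one pass of A's inner 'for i in range(0, len-2)' loop, sliding a window of 3;
-- returns (list after the pass, done-flag: no swap happened)
def pvPassA : List Int → List Int × Bool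
  | a :: b :: c :: t =>
    if a ≤ c then
      let p := pvPassA (b :: c :: t)
      (a :: p.1, p.2)
    else
      let p := pvPassA (b :: a :: t)
      (c :: p.1, false)
  | xs => (xs, true)
termination_by xs => xs.length

theorem pvEvens_cons (a : Int) (l : List Int) : pvEvens (a :: l) = a :: pvOdds l := by
  cases l <;> simp [pvEvens, pvOdds]

theorem pvMeasure_cons (a : Int) (l : List Int) :
    pvMeasure (a :: l) = (pvOdds l).countP (fun x => x < a) + pvMeasure l := by
  simp [pvMeasure, pvEvens_cons, pvOdds, pvInv]
  omega

-- pass lemma bundle: parity-wise permutation, measure never increases, strict decrease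
-- when a swap happened, identity when done
theorem pvPassA_main (xs : List Int) :
    ((pvEvens (pvPassA xs).1).Perm (pvEvens xs)) ∧
    ((pvOdds (pvPassA xs).1).Perm (pvOdds xs)) ∧
    pvMeasure (pvPassA xs).1 ≤ pvMeasure xs ∧
    ((pvPassA xs).2 = false → pvMeasure (pvPassA xs).1 < pvMeasure xs) ∧
    ((pvPassA xs).2 = true → (pvPassA xs).1 = xs) := by
  induction xs using pvPassA.induct with
  | case1 a b c t hle ih =>
    obtain ⟨ihE, ihO, ihLe, ihLt, ihId⟩ := ih
    rw [pvPassA]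
    simp only [if_pos hle]
    refine ⟨?_, ?_, ?_, ?_, ?_⟩
    · rw [pvEvens_cons, pvEvens_cons]
      exact ihO.cons a
    · simpa [pvOdds] using ihE
    · rw [pvMeasure_cons, pvMeasure_cons]
      have hc := List.Perm.countP_eq (fun x => decide (x < a)) ihO
      simp only [List.countP] at *
      omega
    · intro h
      rw [pvMeasure_cons, pvMeasure_cons]
      have hc := List.Perm.countP_eq (fun x => decide (x < a)) ihO
      have := ihLt h
      simp only [List.countP] at *
      omega
    · intro h; rw [ihId h]
  | case2 a b c t hle ih =>
    obtain ⟨ihE, ihO, ihLe, ihLt, ihId⟩ := ih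
    have hca : c < a := by omega
    rw [pvPassA]
    simp only [if_neg hle]
    have hOsh : pvOdds (b :: a :: t) = a :: pvOdds t := by
      simp [pvOdds, pvEvens_cons]
    have hEsh : pvEvens (b :: a :: t) = b :: pvEvens t := by
      simp [pvEvens_cons, pvOdds]
    have hmeas : pvMeasure (a :: b :: c :: t)
        = ((pvOdds t).countP (fun x => decide (x < a)) + 1)
          + (pvEvens t).countP (fun x => decide (x < b))
          + (pvOdds t).countP (fun x => decide (x < c)) + pvMeasure t := by
      rw [pvMeasure_cons, pvMeasure_cons, pvMeasure_cons]
      simp [pvOdds, pvEvens_cons, hca]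
      omega
    have hmeas2 : pvMeasure (b :: a :: t)
        = (pvEvens t).countP (fun x => decide (x < b))
          + (pvOdds t).countP (fun x => decide (x < a)) + pvMeasure t := by
      rw [pvMeasure_cons, pvMeasure_cons]
      simp [pvOdds]
      omega
    refine ⟨?_, ?_, ?_, ?_, ?_⟩
    · rw [pvEvens_cons, pvEvens_cons]
      have h1 : (c :: pvOdds (pvPassA (b :: a :: t)).1).Perm (c :: a :: pvOdds t) :=
        (ihO.trans (by rw [hOsh])).cons c
      have h3 : a :: pvOdds (b :: c :: t) = a :: c :: pvOdds t := by
        simp [pvOdds, pvEvens_cons]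
      rw [h3]
      exact h1.trans (List.Perm.swap a c _)
    · show (pvEvens (pvPassA (b :: a :: t)).1).Perm (pvOdds (a :: b :: c :: t))
      have h3 : pvOdds (a :: b :: c :: t) = b :: pvEvens t := by
        simp [pvOdds, pvEvens_cons]
      rw [h3, ← hEsh]
      exact ihE
    · rw [pvMeasure_cons]
      have hc := List.Perm.countP_eq (fun x => decide (x < c)) (ihO.trans (by rw [hOsh]))
      rw [hmeas2] at ihLe
      rw [hmeas]
      rw [hc]
      simp only [List.countP_cons]
      have : ¬ (a < c) := by omega
      simp [this]
      omega
    · intro _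
      rw [pvMeasure_cons]
      have hc := List.Perm.countP_eq (fun x => decide (x < c)) (ihO.trans (by rw [hOsh]))
      rw [hmeas2] at ihLe
      rw [hmeas, hc]
      simp only [List.countP_cons]
      have : ¬ (a < c) := by omega
      simp [this]
      omega
    · intro h; simp at h
  | case3 xs h =>
    rcases xs with _ | ⟨a, _ | ⟨b, _ | ⟨c, t⟩⟩⟩
    · simp [pvPassA]
    · simp [pvPassA]
    · simp [pvPassA]
    · exact absurd rfl (h a b c t)

-- A's outer 'while not done' loop
def pvLoopA (xs : List Int) : List Int :=
  let p := pvPassA xs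
  if p.2 then p.1 else pvLoopA p.1
termination_by pvMeasure xs
decreasing_by
  exact (pvPassA_main xs).2.2.2.1 (by simpa using ‹¬ (pvPassA xs).2 = true›)

-- A's final scan: for index in range(0, len-1): if not s[index] <= s[index+1]: break
def pvScanA (s : List Int) : List Int → String
  | [] => "OK"
  | i :: rest =>
    match PySem.List.pyGet? s i, PySem.List.pyGet? s (i + 1) with
    | some x, some y => if ¬ (x ≤ y) then PySem.Int.toStr i else pvScanA s rest
    | _, _ => "OK"

def eval_trouble_sort (sequence : List Int) : String :=
  let s := pvLoopA sequence
  pvScanA s (PySem.List.pyRange 0 ((s.length : Int) - 1) 1)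

-- ===== PORT B =====

-- B's scan: for i, (x, y) in enumerate(zip(merged, merged[1:])): if x > y: return str(i)
def pvScanB : List (Int × (Int × Int)) → String
  | [] => "OK"
  | (i, (x, y)) :: rest => if x > y then PySem.Int.toStr i else pvScanB rest

def eval_trouble_sort_alt (sequence : List Int) : String :=
  let evens := PySem.List.sorted ((PySem.List.slice? sequence (some 0) none 2).getD []) id
  let odds := PySem.List.sorted ((PySem.List.slice? sequence (some 1) none 2).getD []) id
  let merged := (evens.zip odds).foldl (fun acc p => acc ++ [p.1, p.2]) []
  let merged2 :=
    if odds.length < evens.length then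
      match PySem.List.pyGet? evens (-1) with
      | some v => merged ++ [v]
      | none => merged
    else merged
  pvScanB (PySem.List.enumerate (merged2.zip (PySem.List.slice merged2 (some 1) none)) 0)

-- ===== PRECONDITION & SPEC =====
def Spec_eval_trouble_sort (sequence : List Int) (out : String) : Prop := out = eval_trouble_sort_alt sequence
instance (sequence : List Int) (out : String) : Decidable (Spec_eval_trouble_sort sequence out) := by unfold Spec_eval_trouble_sort; infer_instance

-- ===== CLAIM (what is proved, stated in full; the proofs are below) =====
def Claim_equal_eval_trouble_sort : Prop := ∀ (sequence : List Int), Dom_eval_trouble_sort sequence → Spec_eval_trouble_sort sequence (eval_trouble_sort sequence)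

-- ===== LEMMAS AND PROOFS =====

-- interleave two lists, taking heads alternately (left first)
def pvInterleave : List Int → List Int → List Int
  | [], ys => ys
  | a :: xs, ys => a :: pvInterleave ys xs
termination_by xs ys => xs.length + ys.length

theorem pvInterleave_evens_odds (l : List Int) : pvInterleave (pvEvens l) (pvOdds l) = l := by
  induction l using pvEvens.induct with
  | case1 => simp [pvEvens, pvOdds, pvInterleave]
  | case2 a => simp [pvEvens, pvOdds, pvInterleave]
  | case3 a b t ih =>
    rw [pvEvens_cons, pvInterleave, pvOdds]
    simp only [List.tail_cons]
    rw [pvEvens_cons, pvInterleave, pvOdds]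
    simp only [List.tail_cons]
    rw [ih]

-- first out-of-order adjacent pair, as a reference recursion both scans reduce to
def pvFB : List Int → Int → String
  | a :: b :: t, k => if b < a then PySem.Int.toStr k else pvFB (b :: t) (k + 1)
  | _, _ => "OK"

theorem pvPassA_done_sorted (xs : List Int) (h : (pvPassA xs).2 = true) :
    (pvEvens xs).Pairwise (· ≤ ·) ∧ (pvOdds xs).Pairwise (· ≤ ·) := by
  induction xs using pvPassA.induct with
  | case1 a b c t hle ih =>
    rw [pvPassA] at h
    simp only [if_pos hle] at h
    obtain ⟨ihE, ihO⟩ := ih h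
    constructor
    · rw [pvEvens_cons]
      have hOc : pvOdds (b :: c :: t) = c :: pvOdds t := by
        simp [pvOdds, pvEvens_cons]
      rw [hOc] at ihO
      rw [show pvOdds (b :: c :: t) = c :: pvOdds t from hOc]
      refine List.Pairwise.cons ?_ ihO
      intro x hx
      rcases List.mem_cons.mp hx with h1 | h1
      · omega
      · have := (List.pairwise_cons.mp ihO).1 x h1
        omega
    · show (pvOdds (a :: b :: c :: t)).Pairwise (· ≤ ·)
      simpa [pvOdds] using ihE
  | case2 a b c t hle ih =>
    rw [pvPassA] at h
    simp only [if_neg hle] at h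
    simp at h
  | case3 xs hx =>
    rcases xs with _ | ⟨a, _ | ⟨b, _ | ⟨c, t⟩⟩⟩
    · simp [pvEvens, pvOdds]
    · simp [pvEvens, pvOdds]
    · simp [pvEvens, pvOdds]
    · exact absurd rfl (hx a b c t)

theorem pvLoopA_main (xs : List Int) :
    ((pvEvens (pvLoopA xs)).Perm (pvEvens xs)) ∧
    ((pvOdds (pvLoopA xs)).Perm (pvOdds xs)) ∧
    (pvEvens (pvLoopA xs)).Pairwise (· ≤ ·) ∧
    (pvOdds (pvLoopA xs)).Pairwise (· ≤ ·) := by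
  induction xs using pvLoopA.induct with
  | case1 xs p hdone =>
    have hdone' : (pvPassA xs).2 = true := hdone
    have hred : pvLoopA xs = (pvPassA xs).1 := by rw [pvLoopA]; simp [hdone']
    rw [hred]
    have hid := (pvPassA_main xs).2.2.2.2 hdone'
    rw [hid]
    have hs := pvPassA_done_sorted xs hdone'
    exact ⟨List.Perm.refl _, List.Perm.refl _, hs.1, hs.2⟩
  | case2 xs p hdone ih =>
    have hdone' : ¬ (pvPassA xs).2 = true := hdone
    have hred : pvLoopA xs = pvLoopA (pvPassA xs).1 := by rw [pvLoopA]; simp [hdone']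
    rw [hred]
    obtain ⟨ihE, ihO, ihPE, ihPO⟩ := ih
    have hm := pvPassA_main xs
    exact ⟨ihE.trans hm.1, ihO.trans hm.2.1, ihPE, ihPO⟩

theorem pvLoopA_canonical (xs : List Int) :
    pvLoopA xs = pvInterleave (PySem.List.sorted (pvEvens xs) id)
                              (PySem.List.sorted (pvOdds xs) id) := by
  obtain ⟨hE, hO, hPE, hPO⟩ := pvLoopA_main xs
  have hse : pvEvens (pvLoopA xs) = PySem.List.sorted (pvEvens xs) id := by
    refine List.Perm.eq_of_pairwise (fun a b _ _ h1 h2 => le_antisymm h1 h2) hPE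
      (by simpa using PySem.List.sorted_pairwise (xs := pvEvens xs) (key := id))
      (hE.trans (PySem.List.sorted_perm _ _ _).symm)
  have hso : pvOdds (pvLoopA xs) = PySem.List.sorted (pvOdds xs) id := by
    refine List.Perm.eq_of_pairwise (fun a b _ _ h1 h2 => le_antisymm h1 h2) hPO
      (by simpa using PySem.List.sorted_pairwise (xs := pvOdds xs) (key := id))
      (hO.trans (PySem.List.sorted_perm _ _ _).symm)
  rw [← hse, ← hso, pvInterleave_evens_odds]

theorem pvStride2 (xs : List Int) :
    List.filterMap (fun (k : Nat) => xs[(0 + 2 * (k : Int)).toNat]?) (List.range (((xs.length : Int) + 1) / 2).toNat)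
      = pvEvens xs := by
  induction xs using pvEvens.induct with
  | case1 => simp [pvEvens]
  | case2 a => simp [pvEvens]
  | case3 a b t ih =>
    have hc : (((a :: b :: t).length : Int) + 1) / 2 = ((t.length : Int) + 1) / 2 + 1 := by
      simp only [List.length_cons]
      omega
    have hcn : ((((a :: b :: t).length : Int) + 1) / 2).toNat
        = (((t.length : Int) + 1) / 2).toNat + 1 := by
      rw [hc]
      omega
    rw [hcn, List.range_succ_eq_map, List.filterMap_cons, List.filterMap_map]
    have h0 : (a :: b :: t)[(0 + 2 * ((0 : Nat) : Int)).toNat]? = some a := by norm_num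
    rw [h0]
    have hf : ∀ k : Nat, ((fun (k : Nat) => (a :: b :: t)[(0 + 2 * (k : Int)).toNat]?) ∘ Nat.succ) k
        = (fun k : Nat => t[(0 + 2 * (k : Int)).toNat]?) k := by
      intro k
      simp only [Function.comp]
      have : (0 + 2 * ((Nat.succ k : Nat) : Int)).toNat = (0 + 2 * (k : Int)).toNat + 2 := by
        push_cast; omega
      rw [this]
      simp
    rw [List.filterMap_congr (fun k _ => hf k)]
    rw [ih]
    rfl

theorem pvSlice02 (xs : List Int) :
    PySem.List.slice? xs (some 0) none 2 = some (pvEvens xs) := by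
  rw [← pvStride2]
  simp only [PySem.List.slice?, PySem.List.sliceIndices]
  norm_num
  have h : (if 0 < xs.length then (((xs.length : Int) + 2 - 1) / 2).toNat else 0)
      = (((xs.length : Int) + 1) / 2).toNat := by
    split <;> omega
  rw [h]

theorem pvSlice12 (xs : List Int) :
    PySem.List.slice? xs (some 1) none 2 = some (pvOdds xs) := by
  cases xs with
  | nil => rfl
  | cons a t =>
    rw [show pvOdds (a :: t) = pvEvens t from rfl, ← pvStride2 t]
    simp only [PySem.List.slice?, PySem.List.sliceIndices]
    norm_num
    have h : (if 0 < t.length then (((t.length : Int) + 2 - 1) / 2).toNat else 0)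
        = (((t.length : Int) + 1) / 2).toNat := by split <;> omega
    rw [h]
    refine List.filterMap_congr (fun k _ => ?_)
    have h2 : (1 + 2 * (k : Int)).toNat = (2 * (k : Int)).toNat + 1 := by omega
    rw [h2, List.getElem?_cons_succ]

theorem pvLenEO (l : List Int) :
    (pvOdds l).length ≤ (pvEvens l).length ∧ (pvEvens l).length ≤ (pvOdds l).length + 1 := by
  induction l using pvEvens.induct with
  | case1 => simp [pvEvens, pvOdds]
  | case2 a => simp [pvEvens, pvOdds]
  | case3 a b t ih =>
    have h1 : pvEvens (a :: b :: t) = a :: pvEvens t := rfl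
    have h2 : pvOdds (a :: b :: t) = b :: pvOdds t := by
      simp [pvOdds, pvEvens_cons]
    rw [h1, h2]
    simp only [List.length_cons]
    omega

theorem pvFoldlFlat (l : List (Int × Int)) (init : List Int) :
    l.foldl (fun acc p => acc ++ [p.1, p.2]) init
      = init ++ l.foldl (fun acc p => acc ++ [p.1, p.2]) [] := by
  induction l generalizing init with
  | nil => simp
  | cons p t ih =>
    rw [List.foldl_cons, List.foldl_cons, ih, ih ([] ++ [p.1, p.2])]
    simp

theorem pvMerged_eq (e o : List Int) (h1 : o.length ≤ e.length) (h2 : e.length ≤ o.length + 1) :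
    (if o.length < e.length then
       (match PySem.List.pyGet? e (-1) with
        | some v => ((e.zip o).foldl (fun acc p => acc ++ [p.1, p.2]) []) ++ [v]
        | none => (e.zip o).foldl (fun acc p => acc ++ [p.1, p.2]) [])
     else (e.zip o).foldl (fun acc p => acc ++ [p.1, p.2]) []) = pvInterleave e o := by
  induction o generalizing e with
  | nil =>
    match e, h2 with
    | [], _ => simp [pvInterleave]
    | [a], _ =>
      have hg : PySem.List.pyGet? [a] (-1) = some a := by
        have := PySem.List.pyGet?_neg_natCast (xs := [a]) (k := 1) (by omega) (by simp)
        simpa using this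
      simp [pvInterleave, hg]
  | cons b o' ih =>
    match e with
    | a :: e' =>
      simp only [List.length_cons] at h1 h2
      have h1' : o'.length ≤ e'.length := by omega
      have h2' : e'.length ≤ o'.length + 1 := by omega
      have hzip : (a :: e').zip (b :: o') = (a, b) :: e'.zip o' := rfl
      have hI : pvInterleave (a :: e') (b :: o') = a :: b :: pvInterleave e' o' := by
        rw [pvInterleave, pvInterleave]
      by_cases hlt : o'.length < e'.length
      · have hne : e' ≠ [] := by
          intro h; rw [h] at hlt; simp at hlt
        have hget : PySem.List.pyGet? (a :: e') (-1) = PySem.List.pyGet? e' (-1) := by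
          obtain ⟨m, hm⟩ : ∃ m, e'.length = m + 1 :=
            ⟨e'.length - 1, by cases e' <;> simp_all⟩
          have g1 := PySem.List.pyGet?_neg_natCast (xs := a :: e') (k := 1) (by omega) (by simp)
          have g2 := PySem.List.pyGet?_neg_natCast (xs := e') (k := 1) (by omega) (by omega)
          norm_num at g1 g2
          rw [g1, g2]
          simp only [hm]
          rw [show m + 1 - 1 = m from rfl, List.getElem?_eq_getElem (by omega)]
          simp
        have hrec := ih e' h1' h2'
        rw [if_pos hlt] at hrec
        have hlt2 : (b :: o').length < (a :: e').length := by
          simp only [List.length_cons]; omega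
        rw [if_pos hlt2, hzip, hget, hI]
        cases hgg : PySem.List.pyGet? e' (-1) with
        | none =>
          simp only [hgg] at hrec ⊢
          rw [List.foldl_cons, pvFoldlFlat, hrec]
          simp
        | some v =>
          simp only [hgg] at hrec ⊢
          rw [List.foldl_cons, pvFoldlFlat, ← hrec]
          simp
      · have hrec := ih e' h1' h2'
        rw [if_neg hlt] at hrec
        have hlt2 : ¬ ((b :: o').length < (a :: e').length) := by
          simp only [List.length_cons]; omega
        rw [if_neg hlt2, hzip, hI]
        rw [List.foldl_cons, pvFoldlFlat, hrec]
        simp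

theorem pvScanB_eq (m : List Int) (k : Int) :
    pvScanB (PySem.List.enumerate (m.zip m.tail) k) = pvFB m k := by
  induction m generalizing k with
  | nil => simp [pvScanB, pvFB, PySem.List.enumerate_nil]
  | cons a m ih =>
    cases m with
    | nil => simp [pvScanB, pvFB, PySem.List.enumerate_nil]
    | cons b t =>
      have hz : (a :: b :: t).zip (a :: b :: t).tail = (a, b) :: (b :: t).zip (b :: t).tail := rfl
      rw [hz, PySem.List.enumerate_cons, pvScanB, pvFB]
      rw [ih (k + 1)]

theorem pvScanA_eq (n : Nat) (s : List Int) (k : Nat) (hn : s.length - k ≤ n) :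
    pvScanA s (PySem.List.pyRange (k : Int) ((s.length : Int) - 1) 1) = pvFB (s.drop k) (k : Int) := by
  induction n generalizing k with
  | zero =>
    have h1 : s.length ≤ k := by omega
    rw [PySem.List.pyRange_one_eq_nil (by omega), List.drop_eq_nil_of_le h1]
    rfl
  | succ n ih =>
    by_cases hk : (k : Int) < (s.length : Int) - 1
    · have hk1 : k + 1 < s.length := by omega
      have hk0 : k < s.length := by omega
      rw [PySem.List.pyRange_one_cons hk, pvScanA]
      have g0 : PySem.List.pyGet? s (k : Int) = some s[k] := by
        rw [PySem.List.pyGet?_natCast]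
        exact List.getElem?_eq_getElem hk0
      have g1 : PySem.List.pyGet? s ((k : Int) + 1) = some s[k + 1] := by
        rw [show ((k : Int) + 1) = ((k + 1 : Nat) : Int) from by push_cast; ring,
            PySem.List.pyGet?_natCast]
        exact List.getElem?_eq_getElem hk1
      rw [g0, g1]
      dsimp only
      have hd : s.drop k = s[k] :: s[k + 1] :: s.drop (k + 2) := by
        rw [List.drop_eq_getElem_cons hk0, List.drop_eq_getElem_cons hk1]
      rw [hd, pvFB]
      by_cases hxy : s[k + 1] < s[k]
      · rw [if_pos hxy, if_pos (Int.not_le.mpr hxy)]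
      · have hle : s[k] ≤ s[k + 1] := by omega
        rw [if_neg hxy, if_neg (not_not_intro hle)]
        have ih' := ih (k + 1) (by omega)
        rw [show (((k + 1 : Nat)) : Int) = (k : Int) + 1 from by push_cast; ring] at ih'
        rw [List.drop_eq_getElem_cons hk1] at ih'
        exact ih'
    · rw [PySem.List.pyRange_one_eq_nil (by omega)]
      have hlen : (s.drop k).length ≤ 1 := by simp; omega
      rcases hdk : s.drop k with _ | ⟨x, _ | ⟨y, t⟩⟩
      · rfl
      · rfl
      · rw [hdk] at hlen; simp at hlen

theorem pvMainEq (sequence : List Int) : eval_trouble_sort sequence = eval_trouble_sort_alt sequence := by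
  simp only [eval_trouble_sort, eval_trouble_sort_alt, pvSlice02, pvSlice12, Option.getD_some]
  have hlen := pvLenEO sequence
  have h1 : (PySem.List.sorted (pvOdds sequence) id).length
      ≤ (PySem.List.sorted (pvEvens sequence) id).length := by
    rw [PySem.List.length_sorted, PySem.List.length_sorted]; exact hlen.1
  have h2 : (PySem.List.sorted (pvEvens sequence) id).length
      ≤ (PySem.List.sorted (pvOdds sequence) id).length + 1 := by
    rw [PySem.List.length_sorted, PySem.List.length_sorted]; exact hlen.2
  have hM := pvMerged_eq (PySem.List.sorted (pvEvens sequence) id)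
    (PySem.List.sorted (pvOdds sequence) id) h1 h2
  rw [hM, PySem.List.slice_from_one]
  have hA := pvScanA_eq (pvLoopA sequence).length (pvLoopA sequence) 0 (by omega)
  simp only [Nat.cast_zero, List.drop_zero] at hA
  rw [hA, pvScanB_eq, pvLoopA_canonical]

-- ===== VERDICT (by name: the statement is the Claim_ definition above) =====
theorem eval_trouble_sort_spec : Claim_equal_eval_trouble_sort := by
  intro sequence _
  unfold Spec_eval_trouble_sort
  exact pvMainEq sequence
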